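-- pv_equiv track=rewrite | github.com/ante-neh/A2SVCompetetiveProgramming | 2170-count-number-of-maximum-bitwise-or-subsets/count-number-of-maximum-bitwise-or-subsets.py | countMaxOrSubsets
-- ===== SOURCE A (Python) =====
-- from typing import List
--
-- def countMaxOrSubsets(nums: List[int]) -> int:
--     subsets = []
--     maxXor = 0
--
--     def backtrack(cur, start):
--         if start > len(nums):
--             return
--
--         subsets.append(cur[:])
--
--         for i in range(start,len(nums)):
--             cur.append(nums[i])
--             backtrack(cur, i + 1)
--             cur.pop()
--
--
--     backtrack([], 0)
--
--     for subset in subsets: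
--         cur = 0
--         for num in subset:
--             cur |= num
--
--         maxXor = max(maxXor, cur)
--
--     count = 0
--
--     for subset in subsets:
--         cur = 0
--         for num in subset:
--             cur |= num
--
--         if cur == maxXor:
--             count += 1
--
--     return count
-- ===== SOURCE B (Python) =====
-- from typing import List
--
-- def countMaxOrSubsets(nums: List[int]) -> int:
--     # DP over reachable OR values: dict mapping OR value -> number of subsets
--     dp = {0: 1}
--     for num in nums:
--         ndp = dict(dp)
--         for v, c in dp.items():
--             w = v | num
--             ndp[w] = ndp.get(w, 0) + c
--         dp = ndp
--     return dp[max(dp)]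
-- ===== Notes on version B (the rewrite author's own statement) =====
-- stated objective: faster
-- what changed: A materialises all 2^n subsets via backtracking and scans them twice (max, then count); B runs a dictionary DP mapping each reachable OR value to the number of subsets producing it, then returns the count stored at the largest key.
import Mathlib
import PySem

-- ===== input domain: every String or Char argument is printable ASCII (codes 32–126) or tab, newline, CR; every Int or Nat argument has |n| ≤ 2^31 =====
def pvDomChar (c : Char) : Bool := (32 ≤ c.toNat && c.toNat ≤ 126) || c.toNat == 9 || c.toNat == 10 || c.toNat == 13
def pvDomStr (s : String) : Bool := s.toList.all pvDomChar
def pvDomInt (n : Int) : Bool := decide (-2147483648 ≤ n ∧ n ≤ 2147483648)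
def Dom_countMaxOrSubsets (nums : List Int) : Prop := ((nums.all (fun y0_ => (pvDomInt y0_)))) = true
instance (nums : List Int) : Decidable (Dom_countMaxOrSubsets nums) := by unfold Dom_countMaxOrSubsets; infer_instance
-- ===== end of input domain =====

-- B replaces A's exponential enumeration of all subsets by a dictionary DP over reachable OR
-- values (OR value → number of subsets), returning the count stored at the largest key.

-- ===== PORT A =====
-- the nested 'backtrack' / its 'for i in range(start, len(nums))' loop, as mutual recursion
mutual
def pvBacktrack (nums : List Int) (cur : List Int) (start : Nat) : List (List Int) :=
  if start > nums.length then []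
  else cur :: pvBtLoop nums cur start
termination_by (nums.length + 1 - start, 1)

def pvBtLoop (nums : List Int) (cur : List Int) (i : Nat) : List (List Int) :=
  if h : i < nums.length then
    pvBacktrack nums (cur ++ [nums[i]]) (i + 1) ++ pvBtLoop nums cur (i + 1)
  else []
termination_by (nums.length + 1 - i, 0)
end

def countMaxOrSubsets (nums : List Int) : Int :=
  let subsets := pvBacktrack nums [] 0
  let maxXor := subsets.foldl (fun m s => max m (s.foldl (fun c n => PySem.Int.bor c n) 0)) 0
  subsets.foldl (fun cnt s => if s.foldl (fun c n => PySem.Int.bor c n) 0 = maxXor then cnt + 1 else cnt) 0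

-- ===== PORT B =====
def countMaxOrSubsets_alt (nums : List Int) : Int :=
  let dp := nums.foldl
    (fun dp num =>
      dp.items.foldl
        (fun nd p => nd.insert (PySem.Int.bor p.1 num) (nd.getD (PySem.Int.bor p.1 num) 0 + p.2))
        dp)
    (PySem.Dict.ofList [((0 : Int), (1 : Int))])
  match PySem.List.max? dp.keys (fun y => y) with
  | some b => dp.getD b 0
  | none => 0

-- ===== PRECONDITION & SPEC =====
def Spec_countMaxOrSubsets (nums : List Int) (out : Int) : Prop := out = countMaxOrSubsets_alt nums
instance (nums : List Int) (out : Int) : Decidable (Spec_countMaxOrSubsets nums out) := by unfold Spec_countMaxOrSubsets; infer_instance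

-- ===== CLAIM (what is proved, stated in full; the proofs are below) =====
def Claim_equal_countMaxOrSubsets : Prop := ∀ (nums : List Int), Dom_countMaxOrSubsets nums → Spec_countMaxOrSubsets nums (countMaxOrSubsets nums)

-- ===== LEMMAS AND PROOFS =====

-- ---- bitwise-OR groundwork: PySem.Int.bor is characterised by testBit, hence associative ----

theorem pvTestBitHigh (m n : Nat) : Nat.testBit m (m + n) = false :=
  Nat.testBit_lt_two_pow (lt_of_lt_of_le Nat.lt_two_pow_self
    (Nat.pow_le_pow_right (by norm_num) (Nat.le_add_right _ _)))

theorem pvIntExt (a b : Int) (h : ∀ k, a.testBit k = b.testBit k) : a = b := by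
  cases a with
  | ofNat m =>
    cases b with
    | ofNat n =>
      exact congrArg Int.ofNat (Nat.eq_of_testBit_eq (fun k => h k))
    | negSucc n =>
      exfalso
      have hk := h (m + n)
      have h2 : Nat.testBit n (m + n) = false := by
        have := pvTestBitHigh n m; rwa [Nat.add_comm] at this
      rw [show Int.testBit (Int.ofNat m) (m+n) = Nat.testBit m (m+n) from rfl,
          show Int.testBit (Int.negSucc n) (m+n) = !(Nat.testBit n (m+n)) from rfl,
          pvTestBitHigh m n, h2] at hk
      simp at hk
  | negSucc m =>
    cases b with
    | ofNat n =>
      exfalso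
      have hk := h (m + n)
      have h2 : Nat.testBit n (m + n) = false := by
        have := pvTestBitHigh n m; rwa [Nat.add_comm] at this
      rw [show Int.testBit (Int.negSucc m) (m+n) = !(Nat.testBit m (m+n)) from rfl,
          show Int.testBit (Int.ofNat n) (m+n) = Nat.testBit n (m+n) from rfl,
          pvTestBitHigh m n, h2] at hk
      simp at hk
    | negSucc n =>
      have hmn : m = n := Nat.eq_of_testBit_eq (fun k => by
        have hk := h k
        rw [show Int.testBit (Int.negSucc m) k = !(Nat.testBit m k) from rfl,
            show Int.testBit (Int.negSucc n) k = !(Nat.testBit n k) from rfl] at hk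
        exact Bool.not_inj hk)
      rw [hmn]

theorem pvZeroLdiff (m : Nat) : Nat.ldiff 0 m = 0 :=
  Nat.eq_of_testBit_eq (fun k => by simp [Nat.testBit_ldiff])

theorem pvLdiffAddAnd (n m : Nat) : Nat.ldiff n m + (n &&& m) = n := by
  induction n using Nat.binaryRec generalizing m with
  | zero => simp [pvZeroLdiff]
  | bit a n ih =>
    induction m using Nat.bitCasesOn with
    | bit b m' =>
      rw [Nat.ldiff_bit, Nat.land_bit, Nat.bit_val, Nat.bit_val, Nat.bit_val]
      have := ih m'
      cases a <;> cases b <;> simp [Bool.toNat] <;> omega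

theorem pvSubAndEqLdiff (n m : Nat) : n - (n &&& m) = Nat.ldiff n m := by
  have h1 := pvLdiffAddAnd n m
  omega

theorem pvNegSuccForm (d : Nat) : -(d : Int) - 1 = Int.negSucc d := by
  rw [Int.negSucc_eq]; push_cast; ring

theorem pvNegSuccArg (n : Nat) : (-Int.negSucc n - 1).toNat = n := by
  have h : -Int.negSucc n - 1 = (n : Int) := by rw [Int.negSucc_eq]; ring
  rw [h, Int.toNat_natCast]

theorem pvBorTestBit (a b : Int) (k : Nat) :
    (PySem.Int.bor a b).testBit k = (a.testBit k || b.testBit k) := by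
  cases a with
  | ofNat m =>
    cases b with
    | ofNat n =>
      have h : PySem.Int.bor (Int.ofNat m) (Int.ofNat n) = Int.ofNat (m ||| n) := by
        rw [PySem.Int.bor,
            if_pos (show (0:Int) ≤ Int.ofNat m from Int.natCast_nonneg m),
            if_pos (show (0:Int) ≤ Int.ofNat n from Int.natCast_nonneg n)]
        rfl
      rw [h, show Int.testBit (Int.ofNat (m ||| n)) k = Nat.testBit (m ||| n) k from rfl,
          Nat.testBit_or]
      rfl
    | negSucc n =>
      have h : PySem.Int.bor (Int.ofNat m) (Int.negSucc n)
          = Int.negSucc (Nat.ldiff n m) := by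
        rw [PySem.Int.bor,
            if_pos (show (0:Int) ≤ Int.ofNat m from Int.natCast_nonneg m),
            if_neg (show ¬ (0:Int) ≤ Int.negSucc n from not_le.mpr (Int.negSucc_lt_zero n)),
            pvNegSuccArg n,
            show (Int.ofNat m).toNat = m from rfl, pvSubAndEqLdiff, pvNegSuccForm]
      rw [h, show Int.testBit (Int.negSucc (Nat.ldiff n m)) k = !(Nat.testBit (Nat.ldiff n m) k) from rfl,
          Nat.testBit_ldiff,
          show Int.testBit (Int.ofNat m) k = Nat.testBit m k from rfl,
          show Int.testBit (Int.negSucc n) k = !(Nat.testBit n k) from rfl]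
      cases Nat.testBit m k <;> cases Nat.testBit n k <;> rfl
  | negSucc m =>
    cases b with
    | ofNat n =>
      have h : PySem.Int.bor (Int.negSucc m) (Int.ofNat n)
          = Int.negSucc (Nat.ldiff m n) := by
        rw [PySem.Int.bor,
            if_neg (show ¬ (0:Int) ≤ Int.negSucc m from not_le.mpr (Int.negSucc_lt_zero m)),
            if_pos (show (0:Int) ≤ Int.ofNat n from Int.natCast_nonneg n),
            pvNegSuccArg m,
            show (Int.ofNat n).toNat = n from rfl, pvSubAndEqLdiff, pvNegSuccForm]
      rw [h, show Int.testBit (Int.negSucc (Nat.ldiff m n)) k = !(Nat.testBit (Nat.ldiff m n) k) from rfl,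
          Nat.testBit_ldiff,
          show Int.testBit (Int.negSucc m) k = !(Nat.testBit m k) from rfl,
          show Int.testBit (Int.ofNat n) k = Nat.testBit n k from rfl]
      cases Nat.testBit m k <;> cases Nat.testBit n k <;> rfl
    | negSucc n =>
      have h : PySem.Int.bor (Int.negSucc m) (Int.negSucc n)
          = Int.negSucc (m &&& n) := by
        rw [PySem.Int.bor,
            if_neg (show ¬ (0:Int) ≤ Int.negSucc m from not_le.mpr (Int.negSucc_lt_zero m)),
            if_neg (show ¬ (0:Int) ≤ Int.negSucc n from not_le.mpr (Int.negSucc_lt_zero n)),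
            pvNegSuccArg m, pvNegSuccArg n,
            pvNegSuccForm]
      rw [h, show Int.testBit (Int.negSucc (m &&& n)) k = !(Nat.testBit (m &&& n) k) from rfl,
          Nat.testBit_and,
          show Int.testBit (Int.negSucc m) k = !(Nat.testBit m k) from rfl,
          show Int.testBit (Int.negSucc n) k = !(Nat.testBit n k) from rfl]
      cases Nat.testBit m k <;> cases Nat.testBit n k <;> rfl

theorem pvBorAssoc (a b c : Int) :
    PySem.Int.bor (PySem.Int.bor a b) c = PySem.Int.bor a (PySem.Int.bor b c) := by
  apply pvIntExt; intro k; simp [pvBorTestBit, Bool.or_assoc]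

theorem pvZeroBor (a : Int) : PySem.Int.bor 0 a = a := by
  rw [PySem.Int.bor_comm, PySem.Int.bor_zero]

-- ---- the multiset of subset OR-values: in A's traversal order (pvO/pvOL), by head ----
-- ---- recursion (pvR), and as B's left-to-right DP evolution (pvF) ----

def pvOL (p : Int) : List Int → List Int
  | [] => []
  | x :: xs => (PySem.Int.bor p x) :: (pvOL (PySem.Int.bor p x) xs ++ pvOL p xs)

def pvO (p : Int) (l : List Int) : List Int := p :: pvOL p l

def pvR : List Int → List Int
  | [] => [0]
  | x :: xs => (pvR xs).map (fun v => PySem.Int.bor x v) ++ pvR xs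

def pvStep (ms : List Int) (num : Int) : List Int := ms ++ ms.map (fun v => PySem.Int.bor v num)

def pvF (nums : List Int) : List Int := nums.foldl pvStep [0]

-- A's subsets, mapped through the OR-fold, are exactly pvO
theorem pvBtLoop_ors (nums : List Int) :
    ∀ (k i : Nat) (cur : List Int) (a : Int), nums.length - i ≤ k →
    (pvBtLoop nums cur i).map (fun s => s.foldl (fun c n => PySem.Int.bor c n) a)
      = pvOL (cur.foldl (fun c n => PySem.Int.bor c n) a) (nums.drop i) := by
  intro k
  induction k with
  | zero =>
    intro i cur a h
    rw [pvBtLoop, dif_neg (by omega), List.drop_eq_nil_of_le (by omega)]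
    simp [pvOL]
  | succ k ih =>
    intro i cur a h
    rw [pvBtLoop]
    by_cases hi : i < nums.length
    · rw [dif_pos hi, List.map_append, pvBacktrack, if_neg (by omega), List.map_cons,
          ih (i+1) (cur ++ [nums[i]]) a (by omega), ih (i+1) cur a (by omega)]
      have hfold : (cur ++ [nums[i]]).foldl (fun c n => PySem.Int.bor c n) a
          = PySem.Int.bor (cur.foldl (fun c n => PySem.Int.bor c n) a) nums[i] := by
        rw [List.foldl_append]; rfl
      rw [hfold, List.drop_eq_getElem_cons hi]
      simp [pvOL]
    · rw [dif_neg hi, List.drop_eq_nil_of_le (by omega)]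
      simp [pvOL]

theorem pvOrs_eq (nums : List Int) :
    (pvBacktrack nums [] 0).map (fun s => s.foldl (fun c n => PySem.Int.bor c n) 0)
      = pvO 0 nums := by
  rw [pvBacktrack, if_neg (by omega), List.map_cons,
      pvBtLoop_ors nums nums.length 0 [] 0 (by omega)]
  simp [pvO]

theorem pvO_perm (l : List Int) :
    ∀ p : Int, (pvO p l).Perm ((pvR l).map (fun v => PySem.Int.bor p v)) := by
  induction l with
  | nil =>
    intro p
    simp [pvO, pvOL, pvR, PySem.Int.bor_zero]
  | cons x xs ih =>
    intro p
    have hstart : pvO p (x :: xs)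
        = p :: (pvO (PySem.Int.bor p x) xs ++ pvOL p xs) := by
      simp [pvO, pvOL]
    rw [hstart]
    have h1 : (p :: (pvO (PySem.Int.bor p x) xs ++ pvOL p xs)).Perm
        (pvO (PySem.Int.bor p x) xs ++ (p :: pvOL p xs)) := List.perm_middle.symm
    refine h1.trans ?_
    have h2 : (pvO (PySem.Int.bor p x) xs ++ pvO p xs).Perm
        (((pvR xs).map (fun v => PySem.Int.bor (PySem.Int.bor p x) v))
          ++ ((pvR xs).map (fun v => PySem.Int.bor p v))) :=
      (ih (PySem.Int.bor p x)).append (ih p)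
    refine h2.trans ?_
    have h3 : ((pvR xs).map (fun v => PySem.Int.bor (PySem.Int.bor p x) v))
        = ((pvR xs).map (fun v => PySem.Int.bor x v)).map (fun v => PySem.Int.bor p v) := by
      rw [List.map_map]
      exact List.map_congr_left (fun v _ => pvBorAssoc p x v)
    rw [h3, pvR, List.map_append]

theorem pvR_append (l : List Int) (y : Int) : (pvR (l ++ [y])).Perm (pvStep (pvR l) y) := by
  induction l with
  | nil =>
    simp [pvR, pvStep, pvZeroBor, PySem.Int.bor_zero]
    exact List.Perm.swap 0 y []
  | cons x l ih =>
    show (pvR (x :: (l ++ [y]))).Perm _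
    rw [pvR]
    have h1 : (((pvR (l ++ [y])).map (fun v => PySem.Int.bor x v)) ++ pvR (l ++ [y])).Perm
        (((pvStep (pvR l) y).map (fun v => PySem.Int.bor x v)) ++ pvStep (pvR l) y) :=
      (ih.map _).append ih
    refine h1.trans ?_
    rw [List.perm_iff_count]
    intro a
    have hcomp : ((pvR l).map (fun v => PySem.Int.bor v y)).map (fun v => PySem.Int.bor x v)
        = ((pvR l).map (fun v => PySem.Int.bor x v)).map (fun v => PySem.Int.bor v y) := by
      rw [List.map_map, List.map_map]
      exact List.map_congr_left (fun v _ => (pvBorAssoc x v y).symm)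
    simp only [pvStep, pvR, List.map_append, List.count_append, hcomp]
    omega

theorem pvR_perm_pvF (l : List Int) : (pvR l).Perm (pvF l) := by
  induction l using List.reverseRecOn with
  | nil => simp [pvR, pvF]
  | append_singleton l y ih =>
    have hF : pvF (l ++ [y]) = pvStep (pvF l) y := by
      simp [pvF, List.foldl_append]
    rw [hF]
    refine (pvR_append l y).trans ?_
    exact ih.append (ih.map _)

-- ---- the dictionary invariant: dp is the counter of the multiset pvF(prefix) ----

def pvInv (dp : PySem.Dict Int Int) (ms : List Int) : Prop :=
  dp.keys.Nodup ∧ (∀ w : Int, dp.getD w 0 = (ms.count w : Int)) ∧ (∀ w : Int, w ∈ dp.keys ↔ w ∈ ms)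

theorem pvInnerGetD (num : Int) (items : List (Int × Int)) :
    ∀ (nd : PySem.Dict Int Int) (w : Int),
    ((items.foldl
        (fun nd p => nd.insert (PySem.Int.bor p.1 num) (nd.getD (PySem.Int.bor p.1 num) 0 + p.2))
        nd).getD w 0)
      = nd.getD w 0 + ((items.filter (fun p => PySem.Int.bor p.1 num == w)).map (fun p => p.2)).sum := by
  induction items with
  | nil => intro nd w; simp
  | cons q t ih =>
    intro nd w
    rw [List.foldl_cons, ih, List.filter_cons]
    by_cases hc : PySem.Int.bor q.1 num = w
    · rw [if_pos (by simpa using hc)]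
      rw [PySem.Dict.getD_insert, if_pos hc.symm, ← hc]
      simp; ring
    · rw [if_neg (by simpa using hc)]
      rw [PySem.Dict.getD_insert, if_neg (fun e => hc e.symm)]

theorem pvCountFilterNe (v : Int) (ms : List Int) :
    ∀ u : Int, (ms.filter (fun x => !(x == v))).count u = if u = v then 0 else ms.count u := by
  induction ms with
  | nil => intro u; simp
  | cons x t ih =>
    intro u
    rw [List.filter_cons]
    by_cases hx : x = v
    · rw [show (!(x == v)) = false by simp [hx], if_neg (by simp), ih u]
      by_cases hu : u = v
      · simp [hu]
      · rw [if_neg hu, if_neg hu, List.count_cons,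
            if_neg (by simpa using (show ¬ x = u from fun e => hu (e.symm.trans hx))), Nat.add_zero]
    · rw [show (!(x == v)) = true by simp [hx], if_pos rfl, List.count_cons, List.count_cons, ih u]
      by_cases hu : u = v
      · rw [if_pos hu, if_pos hu,
            if_neg (by simpa using (show ¬ x = u from fun e => hx (e.trans hu))), Nat.add_zero]
      · rw [if_neg hu, if_neg hu]

theorem pvSumCounts (g : Int → Int) (w : Int) :
    ∀ (items : List (Int × Int)) (ms : List Int),
    (items.map Prod.fst).Nodup →
    (∀ p ∈ items, p.2 = (ms.count p.1 : Int)) →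
    (∀ v : Int, v ∈ items.map Prod.fst ↔ v ∈ ms) →
    ((items.filter (fun p => g p.1 == w)).map (fun p => p.2)).sum = ((ms.map g).count w : Int) := by
  intro items
  induction items with
  | nil =>
    intro ms _ _ hm
    have hms : ms = [] := by
      cases ms with
      | nil => rfl
      | cons v t => exact absurd ((hm v).2 (List.mem_cons_self)) (by simp)
    subst hms; simp
  | cons q t ih =>
    intro ms hnd hc hm
    have hq2 : q.2 = (ms.count q.1 : Int) := hc q List.mem_cons_self
    have hvnot : q.1 ∉ t.map Prod.fst := by
      rw [List.map_cons] at hnd; exact (List.nodup_cons.mp hnd).1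
    have hnd' : (t.map Prod.fst).Nodup := by
      rw [List.map_cons] at hnd; exact (List.nodup_cons.mp hnd).2
    have hc' : ∀ p ∈ t, p.2 = ((ms.filter (fun x => !(x == q.1))).count p.1 : Int) := by
      intro p hp
      have hne : p.1 ≠ q.1 := by
        intro e
        exact hvnot (e ▸ List.mem_map.mpr ⟨p, hp, rfl⟩)
      rw [hc p (List.mem_cons_of_mem q hp), pvCountFilterNe q.1 ms p.1, if_neg hne]
    have hm' : ∀ v : Int, v ∈ t.map Prod.fst ↔ v ∈ ms.filter (fun x => !(x == q.1)) := by
      intro v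
      constructor
      · intro hv
        have hvm : v ∈ ms := (hm v).1 (by rw [List.map_cons]; exact List.mem_cons_of_mem _ hv)
        have hne : v ≠ q.1 := fun e => hvnot (e ▸ hv)
        exact List.mem_filter.mpr ⟨hvm, by simpa using hne⟩
      · intro hv
        obtain ⟨hvm, hne⟩ := List.mem_filter.mp hv
        have := (hm v).2 hvm
        rw [List.map_cons] at this
        rcases List.mem_cons.mp this with h | h
        · exact absurd h (by simpa using hne)
        · exact h
    have hIH := ih (ms.filter (fun x => !(x == q.1))) hnd' hc' hm'
    rw [List.filter_cons]
    -- decompose the count of w in (ms.map g)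
    have hperm : ((ms.filter (fun x => x == q.1)) ++ (ms.filter (fun x => !(x == q.1)))).Perm ms :=
      List.filter_append_perm _ ms
    have hsplit : (ms.map g).count w
        = ((ms.filter (fun x => x == q.1)).map g).count w
          + ((ms.filter (fun x => !(x == q.1))).map g).count w := by
      rw [← (hperm.map g).count_eq, List.map_append, List.count_append]
    have hfeq : ms.filter (fun x => x == q.1) = List.replicate (ms.count q.1) q.1 :=
      List.filter_beq q.1
    have hrepl : ((ms.filter (fun x => x == q.1)).map g).count w
        = if g q.1 = w then ms.count q.1 else 0 := by
      rw [hfeq, List.map_replicate, List.count_replicate]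
      by_cases h : g q.1 = w <;> simp [h]
    by_cases hgw : g q.1 = w
    · rw [if_pos (by simpa using hgw), List.map_cons, List.sum_cons, hIH, hq2, hsplit, hrepl,
          if_pos hgw]
      push_cast; ring
    · rw [if_neg (by simpa using hgw), hIH, hsplit, hrepl, if_neg hgw]
      push_cast; ring

theorem pvStepInv (dp : PySem.Dict Int Int) (ms : List Int) (num : Int) (h : pvInv dp ms) :
    pvInv
      (dp.items.foldl
        (fun nd p => nd.insert (PySem.Int.bor p.1 num) (nd.getD (PySem.Int.bor p.1 num) 0 + p.2))
        dp)
      (pvStep ms num) := by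
  obtain ⟨hnd, hgd, hmem⟩ := h
  have hkeys : dp.keys = dp.items.map Prod.fst := rfl
  refine ⟨?_, ?_, ?_⟩
  · exact PySem.Dict.nodup_keys_foldl_insert_key dp.items
      (fun p => PySem.Int.bor p.1 num)
      (fun nd p => nd.getD (PySem.Int.bor p.1 num) 0 + p.2) dp hnd
  · intro w
    rw [pvInnerGetD]
    have hsum := pvSumCounts (fun v => PySem.Int.bor v num) w dp.items ms
      (hkeys ▸ hnd)
      (fun p hp => by
        have := PySem.Dict.getD_of_mem_items (d := dp) (k := p.1) (v := p.2) (d0 := 0)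
          (by simpa using hp) hnd
        rw [← this, hgd])
      (fun v => (hkeys ▸ hmem v))
    simp only at hsum
    rw [hsum, hgd w]
    simp only [pvStep, List.count_append]
    push_cast; ring
  · intro w
    rw [PySem.Dict.keys_foldl_insert_key dp.items
          (fun p => PySem.Int.bor p.1 num)
          (fun nd p => nd.getD (PySem.Int.bor p.1 num) 0 + p.2) dp,
        PySem.Set.update_map_eq_foldl_add dp.items (fun p => PySem.Int.bor p.1 num) dp.keys,
        PySem.Set.mem_foldl_add]
    simp only [pvStep, List.mem_append, List.mem_map]
    constructor
    · rintro (hw | ⟨p, hp, rfl⟩)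
      · exact Or.inl ((hmem w).1 hw)
      · refine Or.inr ⟨p.1, ?_, rfl⟩
        exact (hmem p.1).1 (hkeys ▸ List.mem_map.mpr ⟨p, hp, rfl⟩)
    · rintro (hw | ⟨v, hv, rfl⟩)
      · exact Or.inl ((hmem w).2 hw)
      · have : v ∈ dp.items.map Prod.fst := hkeys ▸ (hmem v).2 hv
        obtain ⟨p, hp, hpv⟩ := List.mem_map.mp this
        exact Or.inr ⟨p, hp, by rw [hpv]⟩

theorem pvFoldInv (l : List Int) :
    ∀ (dp : PySem.Dict Int Int) (ms : List Int), pvInv dp ms →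
    pvInv
      (l.foldl
        (fun dp num => dp.items.foldl
          (fun nd p => nd.insert (PySem.Int.bor p.1 num) (nd.getD (PySem.Int.bor p.1 num) 0 + p.2))
          dp)
        dp)
      (l.foldl pvStep ms) := by
  induction l with
  | nil => intro dp ms h; exact h
  | cons x t ih =>
    intro dp ms h
    exact ih _ _ (pvStepInv dp ms x h)

theorem pvInitInv : pvInv (PySem.Dict.ofList [((0 : Int), (1 : Int))]) [0] := by
  have hd2 : PySem.Dict.ofList [((0 : Int), (1 : Int))] = PySem.Dict.empty.insert 0 1 := by decide
  refine ⟨by decide, ?_, ?_⟩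
  · intro w
    by_cases hw : w = 0
    · subst hw; rfl
    · rw [hd2, PySem.Dict.getD_insert, if_neg hw, PySem.Dict.getD_empty]
      have h0 : ([0] : List Int).count w = 0 := by
        rw [List.count_cons, if_neg (by simpa using (show ¬ (0:Int) = w from fun e => hw e.symm))]
        rfl
      rw [h0]
      rfl
  · intro w
    have hk : (PySem.Dict.ofList [((0 : Int), (1 : Int))]).keys = [0] := by decide
    rw [hk]

theorem pvMemFoldStep (l : List Int) :
    ∀ (ms : List Int) (v : Int), v ∈ ms → v ∈ l.foldl pvStep ms := by
  induction l with
  | nil => intro ms v h; exact h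
  | cons x t ih =>
    intro ms v h
    exact ih _ v (by simp only [pvStep, List.mem_append]; exact Or.inl h)

-- ---- reshaping A's two report loops ----

theorem pvFoldMax (ls : List (List Int)) :
    ∀ (a : Int),
    ls.foldl (fun m s => max m (s.foldl (fun c n => PySem.Int.bor c n) 0)) a
      = (ls.map (fun s => s.foldl (fun c n => PySem.Int.bor c n) 0)).foldl max a := by
  induction ls with
  | nil => intro a; rfl
  | cons s t ih =>
    intro a
    simp only [List.foldl_cons, List.map_cons]
    exact ih _

theorem pvFoldCnt (ls : List (List Int)) (M : Int) :
    ∀ (a : Int),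
    ls.foldl (fun cnt s => if s.foldl (fun c n => PySem.Int.bor c n) 0 = M then cnt + 1 else cnt) a
      = (ls.map (fun s => s.foldl (fun c n => PySem.Int.bor c n) 0)).foldl
          (fun cnt v => if v = M then cnt + 1 else cnt) a := by
  induction ls with
  | nil => intro a; rfl
  | cons s t ih =>
    intro a
    simp only [List.foldl_cons, List.map_cons]
    exact ih _

theorem pvCntFold (l : List Int) (M : Int) :
    ∀ (a : Int),
    l.foldl (fun cnt v => if v = M then cnt + 1 else cnt) a = a + (l.count M : Int) := by
  induction l with
  | nil => intro a; simp
  | cons x t ih =>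
    intro a
    simp only [List.foldl_cons, List.count_cons]
    by_cases hx : x = M
    · rw [if_pos hx, ih, if_pos (by simpa using hx)]
      push_cast; ring
    · rw [if_neg hx, ih, if_neg (by simpa using hx)]
      push_cast; ring

theorem pvA_eq (nums : List Int) :
    countMaxOrSubsets nums
      = (((pvO 0 nums).count ((pvO 0 nums).foldl max 0)) : Int) := by
  have h : countMaxOrSubsets nums
      = (pvBacktrack nums [] 0).foldl
          (fun cnt s => if s.foldl (fun c n => PySem.Int.bor c n) 0
              = ((pvBacktrack nums [] 0).foldl
                  (fun m s => max m (s.foldl (fun c n => PySem.Int.bor c n) 0)) 0)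
            then cnt + 1 else cnt) 0 := rfl
  rw [h, pvFoldCnt, pvFoldMax, pvOrs_eq, pvCntFold]
  simp

-- ===== VERDICT (by name: the statement is the Claim_ definition above) =====
theorem countMaxOrSubsets_spec : Claim_equal_countMaxOrSubsets := by
  intro nums _dom
  unfold Spec_countMaxOrSubsets
  obtain ⟨hnd, hgd, hmem⟩ :=
    pvFoldInv nums (PySem.Dict.ofList [((0 : Int), (1 : Int))]) [0] pvInitInv
  generalize hdp : nums.foldl
      (fun dp num =>
        dp.items.foldl
          (fun nd p => nd.insert (PySem.Int.bor p.1 num) (nd.getD (PySem.Int.bor p.1 num) 0 + p.2))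
          dp)
      (PySem.Dict.ofList [((0 : Int), (1 : Int))]) = dp
  rw [hdp] at hnd hgd hmem
  have halt : countMaxOrSubsets_alt nums
      = (match PySem.List.max? dp.keys (fun y => y) with
         | some b => dp.getD b 0
         | none => 0) := by
    rw [← hdp]
    rfl
  rw [pvA_eq, halt]
  have h0 : (0 : Int) ∈ dp.keys := (hmem 0).2 (pvMemFoldStep nums [0] 0 (by simp))
  obtain ⟨b, hb⟩ : ∃ b, PySem.List.max? dp.keys (fun y => y) = some b := by
    cases h : PySem.List.max? dp.keys (fun y => y) with
    | none =>
      rw [PySem.List.max?_eq_none_iff] at h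
      rw [h] at h0
      exact absurd h0 (by simp)
    | some b => exact ⟨b, rfl⟩
  rw [hb]
  show _ = dp.getD b 0
  have hperm : (pvO 0 nums).Perm (pvF nums) := by
    refine (pvO_perm nums 0).trans ?_
    have hid : (pvR nums).map (fun v => PySem.Int.bor 0 v) = pvR nums := by
      have he : (fun v => PySem.Int.bor 0 v) = (fun v : Int => v) := funext pvZeroBor
      rw [he, List.map_id']
    rw [hid]
    exact pvR_perm_pvF nums
  have hMfacts := PySem.List.le_foldl_max (pvO 0 nums) 0
  have hMmem : ((pvO 0 nums).foldl max 0) ∈ pvO 0 nums := by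
    rcases PySem.List.foldl_max_mem (pvO 0 nums) 0 with h | h
    · rw [h]; show (0 : Int) ∈ 0 :: pvOL 0 nums; simp
    · exact h
  have hbmem : b ∈ dp.keys := PySem.List.max?_mem hb
  have hbM : b = (pvO 0 nums).foldl max 0 := by
    apply le_antisymm
    · exact hMfacts.2 b (hperm.mem_iff.2 ((hmem b).1 hbmem))
    · exact PySem.List.max?_isMax hb _ ((hmem _).2 (hperm.mem_iff.1 hMmem))
  rw [hgd b, hbM]
  congr 1
  exact hperm.count_eq _
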